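-- pv_equiv track=rewrite | github.com/nghiatt90/cs-practice | codelearn/kthboring.py | kthBoring
-- ===== SOURCE A (Python) =====
-- def kthBoring(k):
--     fib0, fib1 = 3, 5
--     num = 3
--     while k:
--         num += 1
--         if num == fib1:
--             n = fib0 + fib1
--             fib0, fib1 = fib1, n
--             continue
--         if miller_rabin(num):
--             continue
--         k -= 1
--     return num
--
-- def _try_composite(a, d, n, s):
--     if pow(a, d, n) == 1:
--         return False
--     for i in range(s):
--         if pow(a, 2**i * d, n) == n-1:
--             return False
--     return True
--
-- def miller_rabin(n,
--                  _known_primes=[2, 3, 5, 7, 11, 13, 17, 19, 23, 29, 31, 37, 41, 43, 47, 53, 59, 61, 67, 71, 73, 79, 83, 89, 97],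
--                  _precision_for_huge_n=16):
--     if n < 2:
--         return False
--     if n in _known_primes:
--         return True
--     if any((n % p) == 0 for p in _known_primes):
--         return False
--     d, s = n - 1, 0
--     while not d % 2:
--         d, s = d >> 1, s + 1
--     # Returns exact according to http://primes.utm.edu/prove/prove2_3.html
--     if n < 1373653:
--         return not any(_try_composite(a, d, n, s) for a in (2, 3))
--     if n < 25326001:
--         return not any(_try_composite(a, d, n, s) for a in (2, 3, 5))
--     if n < 118670087467:
--         if n == 3215031751:
--             return False
--         return not any(_try_composite(a, d, n, s) for a in (2, 3, 5, 7))
--     return not any(_try_composite(a, d, n, s)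
--                    for a in _known_primes[:_precision_for_huge_n])
-- ===== SOURCE B (Python) =====
-- _SMALL = [2, 3, 5, 7, 11, 13, 17, 19, 23, 29, 31, 37, 41, 43, 47, 53, 59, 61,
--           67, 71, 73, 79, 83, 89, 97]
--
--
-- def _is_prime(n):
--     if n < 2:
--         return False
--     for p in _SMALL:
--         if n % p == 0:
--             return n == p
--     if n == 3215031751:
--         return False
--     d, s = n - 1, 0
--     while d % 2 == 0:
--         d //= 2
--         s += 1
--     if n < 1373653:
--         bases = _SMALL[:2]
--     elif n < 25326001:
--         bases = _SMALL[:3]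
--     elif n < 118670087467:
--         bases = _SMALL[:4]
--     else:
--         bases = _SMALL[:16]
--     for a in bases:
--         x = pow(a, d, n)
--         if x == 1 or x == n - 1:
--             continue
--         ok = False
--         for _ in range(s - 1):
--             x = x * x % n
--             if x == n - 1:
--                 ok = True
--                 break
--         if not ok:
--             return False
--     return True
--
--
-- def kthBoring(k):
--     # Guess a bound, batch-enumerate all boring numbers up to it (with the
--     # Fibonacci numbers precomputed as a table), index; double the bound if short.
--     hi = 8
--     while True:
--         fibs = []
--         a, b = 3, 5
--         while b <= hi:
--             fibs.append(b)
--             a, b = b, a + b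
--         boring = [3] + [n for n in range(4, hi + 1)
--                         if n not in fibs and not _is_prime(n)]
--         if k < len(boring):
--             return boring[k]
--         hi *= 2
-- ===== Notes on version B (the rewrite author's own statement) =====
-- stated objective: alternative
-- what changed: B replaces A's streaming countdown with a rolling Fibonacci pair by a guess-and-double batch search: it precomputes the Fibonacci numbers up to a bound as a table, enumerates all boring numbers up to the bound in one filtering pass, indexes the k-th, and doubles the bound when the list is too short; the primality helper is also restructured (first-divisor scan, one modular exponentiation plus repeated squaring with early exit instead of recomputing each power).
import Mathlib
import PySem

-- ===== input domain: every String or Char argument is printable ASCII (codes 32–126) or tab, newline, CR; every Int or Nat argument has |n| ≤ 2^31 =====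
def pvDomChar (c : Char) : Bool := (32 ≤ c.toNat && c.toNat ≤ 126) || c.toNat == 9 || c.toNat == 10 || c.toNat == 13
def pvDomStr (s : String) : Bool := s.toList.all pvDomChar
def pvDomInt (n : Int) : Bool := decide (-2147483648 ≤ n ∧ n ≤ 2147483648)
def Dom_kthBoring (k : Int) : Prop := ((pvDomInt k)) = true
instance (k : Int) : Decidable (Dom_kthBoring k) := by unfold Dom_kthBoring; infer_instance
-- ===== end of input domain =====

-- B replaces A's streaming countdown with a rolling Fibonacci pair by a
-- guess-and-double batch search: Fibonacci numbers up to a bound precomputed as a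
-- table, one filtering pass listing all boring numbers up to the bound, index the
-- k-th, double the bound if the list is too short; the primality helper is also
-- restructured (first-divisor scan, one modular exponentiation plus repeated
-- squaring with early exit).

-- ===== PORT A =====
-- the module constant _known_primes (also _SMALL in Source B)
def pvKnownPrimes : List Int :=
  [2, 3, 5, 7, 11, 13, 17, 19, 23, 29, 31, 37, 41, 43, 47, 53, 59, 61, 67, 71, 73, 79, 83, 89, 97]

-- the while-loop 'while not d % 2: d, s = d >> 1, s + 1' (identical in Source A and Source B,
-- so both ports share it); the '0 < d' conjunct only guards termination — on every
-- reachable call d = n - 1 ≥ 1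
def pvSplit (d : Int) (s : Nat) : Int × Nat :=
  if h : 0 < d ∧ PySem.Int.mod d 2 = 0 then pvSplit (PySem.Int.floordiv d 2) (s + 1)
  else (d, s)
termination_by d.toNat
decreasing_by
  rw [PySem.Int.floordiv_eq_ediv_of_pos (by omega : (0:Int) < 2)]
  omega

def tryComposite (a d n : Int) (s : Nat) : Bool :=
  if PySem.Int.powMod a d.toNat n = 1 then false
  else if (List.range s).any (fun i => PySem.Int.powMod a ((2 ^ i : Int) * d).toNat n = n - 1)
  then false
  else true

def millerRabin (n : Int) : Bool :=
  if n < 2 then false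
  else if pvKnownPrimes.contains n then true
  else if pvKnownPrimes.any (fun p => PySem.Int.mod n p = 0) then false
  else
    let ds := pvSplit (n - 1) 0
    let d := ds.1
    let s := ds.2
    if n < 1373653 then !(([2, 3] : List Int).any fun a => tryComposite a d n s)
    else if n < 25326001 then !(([2, 3, 5] : List Int).any fun a => tryComposite a d n s)
    else if n < 118670087467 then
      if n = 3215031751 then false
      else !(([2, 3, 5, 7] : List Int).any fun a => tryComposite a d n s)
    else !((pvKnownPrimes.take 16).any fun a => tryComposite a d n s)

-- the 'while k:' loop; fuel only makes the recursion structural (proved sufficient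
-- below: among any four consecutive candidates at least one is boring)
def loopA (fuel : Nat) (k num fib0 fib1 : Int) : Int :=
  match fuel with
  | 0 => num
  | fuel + 1 =>
    if k = 0 then num
    else if num + 1 = fib1 then loopA fuel k (num + 1) fib1 (fib0 + fib1)
    else if millerRabin (num + 1) then loopA fuel k (num + 1) fib0 fib1
    else loopA fuel (k - 1) (num + 1) fib0 fib1

def kthBoring (k : Int) : Int := loopA (4 * k.toNat + 1) k 3 3 5

-- ===== PORT B =====
-- 'for p in _SMALL: if n % p == 0: return n == p' (early-exit scan; none = fell through)
def pvScanDiv (n : Int) : List Int → Option Bool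
  | [] => none
  | p :: ps => if PySem.Int.mod n p = 0 then some (n = p) else pvScanDiv n ps

-- 'for _ in range(s-1): x = x*x % n; if x == n-1: ok = True; break'
def sqLoopB (n x : Int) : Nat → Bool
  | 0 => false
  | j + 1 =>
    let x' := PySem.Int.mod (x * x) n
    if x' = n - 1 then true else sqLoopB n x' j

def strongTestB (n d : Int) (s : Nat) (a : Int) : Bool :=
  let x := PySem.Int.powMod a d.toNat n
  if x = 1 || x = n - 1 then true
  else sqLoopB n x (s - 1)

def isPrimeB (n : Int) : Bool :=
  if n < 2 then false
  else
    match pvScanDiv n pvKnownPrimes with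
    | some b => b
    | none =>
      if n = 3215031751 then false
      else
        let ds := pvSplit (n - 1) 0
        let d := ds.1
        let s := ds.2
        let bases :=
          if n < 1373653 then pvKnownPrimes.take 2
          else if n < 25326001 then pvKnownPrimes.take 3
          else if n < 118670087467 then pvKnownPrimes.take 4
          else pvKnownPrimes.take 16
        bases.all (strongTestB n d s)

-- 'fibs = []; a, b = 3, 5; while b <= hi: fibs.append(b); a, b = b, a + b'
-- (the '0 < f0' conjunct only guards termination; on every reachable call f0 > 0)
def fibList (hi f0 f1 : Int) : List Int :=
  if h : 0 < f0 ∧ f1 ≤ hi then f1 :: fibList hi f1 (f0 + f1) else []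
termination_by (hi + 1 - f1).toNat
decreasing_by omega

-- 'boring = [3] + [n for n in range(4, hi + 1) if n not in fibs and not _is_prime(n)]'
def boringList (hi : Int) : List Int :=
  3 :: (PySem.List.pyRange 4 (hi + 1) 1).filter
        (fun n => !((fibList hi 3 5).contains n) && !isPrimeB n)

-- the 'while True:' doubling loop; fuel only makes it structural (k.toNat + 1 is
-- proved sufficient below)
def searchB (fuel : Nat) (k hi : Int) : Int :=
  match fuel with
  | 0 => 0
  | fuel + 1 =>
    let bl := boringList hi
    if k < (bl.length : Int) then bl.getD k.toNat 0
    else searchB fuel k (2 * hi)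

def kthBoring_alt (k : Int) : Int := searchB (k.toNat + 1) k 8

-- ===== PRECONDITION & SPEC =====
-- Pre_ excludes negative k, on which A's 'while k:' never terminates (k only decreases).
def Pre_kthBoring (k : Int) : Prop := 0 ≤ k
instance (k : Int) : Decidable (Pre_kthBoring k) := by unfold Pre_kthBoring; infer_instance
def pvWitness_kthBoring : Int := 5

def Spec_kthBoring (k : Int) (out : Int) : Prop := out = kthBoring_alt k
instance (k : Int) (out : Int) : Decidable (Spec_kthBoring k out) := by unfold Spec_kthBoring; infer_instance

-- ===== CLAIM (what is proved, stated in full; the proofs are below) =====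
def Claim_equal_kthBoring : Prop := ∀ (k : Int), Dom_kthBoring k → Pre_kthBoring k → Spec_kthBoring k (kthBoring k)

-- ===== LEMMAS AND PROOFS =====

-- ---- the primality tests agree ----

theorem pvSplit_s_le : ∀ (d : Int) (s : Nat), s ≤ (pvSplit d s).2 := by
  intro d s
  induction d, s using pvSplit.induct with
  | case1 d s h ih => rw [pvSplit]; rw [dif_pos h]; omega
  | case2 d s h => rw [pvSplit]; rw [dif_neg h]

theorem pvSplit_pos : ∀ (d : Int) (s : Nat), 0 < d → 0 < (pvSplit d s).1 := by
  intro d s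
  induction d, s using pvSplit.induct with
  | case1 d s h ih =>
    intro _
    rw [pvSplit, dif_pos h]
    apply ih
    obtain ⟨h1, h2⟩ := h
    rw [PySem.Int.mod_eq_emod_of_pos (by omega : (0:Int) < 2)] at h2
    rw [PySem.Int.floordiv_eq_ediv_of_pos (by omega : (0:Int) < 2)]
    omega
  | case2 d s h => intro hd; rw [pvSplit, dif_neg h]; exact hd

theorem pvSplit_s_one (d : Int) (h0 : 0 < d) (h2 : PySem.Int.mod d 2 = 0) :
    1 ≤ (pvSplit d 0).2 := by
  rw [pvSplit, dif_pos ⟨h0, h2⟩]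
  exact pvSplit_s_le _ _

theorem powMod_sq (a d n : Int) (i : Nat) (hd : 0 ≤ d) (hn : 0 < n) :
    PySem.Int.powMod a (((2:Int) ^ (i+1)) * d).toNat n =
      PySem.Int.mod
        (PySem.Int.powMod a (((2:Int) ^ i) * d).toNat n *
         PySem.Int.powMod a (((2:Int) ^ i) * d).toNat n) n := by
  have hp : (0:Int) ≤ (2:Int) ^ i * d := mul_nonneg (by positivity) hd
  rw [PySem.Int.powMod_eq_emod _ _ hn, PySem.Int.powMod_eq_emod _ _ hn,
      PySem.Int.mod_eq_emod_of_pos hn, ← Int.mul_emod, ← pow_add]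
  congr 1
  have h1 : ((2:Int) ^ (i+1)) * d = (2 ^ i * d) + (2 ^ i * d) := by ring
  rw [h1, Int.toNat_add hp hp]

theorem sqLoop_iff (a d n : Int) (hd : 0 ≤ d) (hn : 0 < n) : ∀ (j i : Nat),
    (sqLoopB n (PySem.Int.powMod a (((2:Int) ^ i) * d).toNat n) j = true ↔
      ∃ m : Nat, i < m ∧ m ≤ i + j ∧ PySem.Int.powMod a (((2:Int) ^ m) * d).toNat n = n - 1) := by
  intro j
  induction j with
  | zero =>
    intro i
    simp only [sqLoopB]
    constructor
    · intro h; exact absurd h (by simp)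
    · rintro ⟨m, h1, h2, _⟩; omega
  | succ j ih =>
    intro i
    simp only [sqLoopB]
    rw [← powMod_sq a d n i hd hn]
    by_cases hx : PySem.Int.powMod a (((2:Int) ^ (i+1)) * d).toNat n = n - 1
    · rw [if_pos hx]
      simp only [true_iff]
      exact ⟨i + 1, by omega, by omega, hx⟩
    · rw [if_neg hx, ih (i + 1)]
      constructor
      · rintro ⟨m, h1, h2, h3⟩; exact ⟨m, by omega, by omega, h3⟩
      · rintro ⟨m, h1, h2, h3⟩
        refine ⟨m, ?_, by omega, h3⟩
        rcases Nat.lt_or_ge i.succ m with h | h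
        · exact h
        · exfalso; have : m = i + 1 := by omega
          exact hx (this ▸ h3)

theorem strong_not_try (n d : Int) (s : Nat) (a : Int)
    (hd : 0 ≤ d) (hn : 0 < n) (hs : 1 ≤ s) :
    strongTestB n d s a = !tryComposite a d n s := by
  have hX0 : PySem.Int.powMod a d.toNat n = PySem.Int.powMod a (((2:Int) ^ 0) * d).toNat n := by
    norm_num
  have hA : tryComposite a d n s = false ↔
      (PySem.Int.powMod a d.toNat n = 1 ∨
        ∃ i : Nat, i < s ∧ PySem.Int.powMod a (((2:Int) ^ i) * d).toNat n = n - 1) := by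
    unfold tryComposite
    split_ifs with h1 h2
    · simp [h1]
    · simp only [List.any_eq_true, List.mem_range, decide_eq_true_eq] at h2
      simp only [true_iff]
      right; obtain ⟨i, hi, hx⟩ := h2; exact ⟨i, hi, hx⟩
    · simp only [List.any_eq_true, List.mem_range, decide_eq_true_eq] at h2
      constructor
      · intro h; exact absurd h (by simp)
      · rintro (h | ⟨i, hi, hx⟩)
        · exact absurd h h1
        · exact absurd ⟨i, hi, hx⟩ h2
  have hB : strongTestB n d s a = true ↔
      (PySem.Int.powMod a d.toNat n = 1 ∨ PySem.Int.powMod a d.toNat n = n - 1 ∨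
        ∃ m : Nat, 0 < m ∧ m ≤ s - 1 ∧ PySem.Int.powMod a (((2:Int) ^ m) * d).toNat n = n - 1) := by
    unfold strongTestB
    by_cases h1 : PySem.Int.powMod a d.toNat n = 1 ∨ PySem.Int.powMod a d.toNat n = n - 1
    · rw [if_pos (by simpa using h1)]
      simp only [true_iff]
      rcases h1 with h | h
      exacts [Or.inl h, Or.inr (Or.inl h)]
    · rw [if_neg (by simpa using h1)]
      conv_lhs => rw [hX0]
      rw [sqLoop_iff a d n hd hn (s - 1) 0]
      push Not at h1
      constructor
      · rintro ⟨m, hm1, hm2, hm3⟩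
        exact Or.inr (Or.inr ⟨m, by omega, by omega, hm3⟩)
      · rintro (h | h | ⟨m, hm1, hm2, hm3⟩)
        · exact absurd h h1.1
        · exact absurd h h1.2
        · exact ⟨m, by omega, by omega, hm3⟩
  have hPQ : (PySem.Int.powMod a d.toNat n = 1 ∨
      ∃ i : Nat, i < s ∧ PySem.Int.powMod a (((2:Int) ^ i) * d).toNat n = n - 1) ↔
      (PySem.Int.powMod a d.toNat n = 1 ∨ PySem.Int.powMod a d.toNat n = n - 1 ∨
        ∃ m : Nat, 0 < m ∧ m ≤ s - 1 ∧ PySem.Int.powMod a (((2:Int) ^ m) * d).toNat n = n - 1) := by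
    constructor
    · rintro (h | ⟨i, hi, hx⟩)
      · exact Or.inl h
      · rcases Nat.eq_zero_or_pos i with rfl | hpos
        · exact Or.inr (Or.inl (hX0 ▸ hx))
        · exact Or.inr (Or.inr ⟨i, hpos, by omega, hx⟩)
    · rintro (h | h | ⟨m, hm1, hm2, hm3⟩)
      · exact Or.inl h
      · exact Or.inr ⟨0, by omega, hX0 ▸ h⟩
      · exact Or.inr ⟨m, by omega, hm3⟩
  cases htc : tryComposite a d n s with
  | false => simp only [Bool.not_false]; exact hB.mpr (hPQ.mp (hA.mp htc))
  | true =>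
    simp only [Bool.not_true]
    rw [← Bool.not_eq_true]
    intro hst
    have := hPQ.mpr (hB.mp hst)
    rw [← hA] at this
    simp [htc] at this

theorem pvScanDiv_none (n : Int) : ∀ l : List Int,
    (pvScanDiv n l = none ↔ ∀ p ∈ l, PySem.Int.mod n p ≠ 0) := by
  intro l
  induction l with
  | nil => simp [pvScanDiv]
  | cons p ps ih =>
    simp only [pvScanDiv]
    by_cases h : PySem.Int.mod n p = 0
    · rw [if_pos h]; simp [h]
    · rw [if_neg h, ih]; simp [h]

theorem pvScanDiv_some (n : Int) : ∀ (l : List Int) (b : Bool),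
    pvScanDiv n l = some b →
    ∃ p ∈ l, PySem.Int.mod n p = 0 ∧ b = decide (n = p) := by
  intro l
  induction l with
  | nil => intro b h; exact absurd h (by simp [pvScanDiv])
  | cons p ps ih =>
    intro b h
    simp only [pvScanDiv] at h
    by_cases hp : PySem.Int.mod n p = 0
    · rw [if_pos hp] at h
      exact ⟨p, by simp, hp, by simpa using h.symm⟩
    · rw [if_neg hp] at h
      obtain ⟨q, hq1, hq2, hq3⟩ := ih b h
      exact ⟨q, by simp [hq1], hq2, hq3⟩

theorem pvMemDiv :
    ∀ n ∈ pvKnownPrimes, ∀ p ∈ pvKnownPrimes, PySem.Int.mod n p = 0 → n = p := by decide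

theorem isPrimeB_eq (n : Int) : isPrimeB n = millerRabin n := by
  by_cases h2 : n < 2
  · simp [isPrimeB, millerRabin, h2]
  · cases hscan : pvScanDiv n pvKnownPrimes with
    | some b =>
      obtain ⟨p, hp, hdiv, rfl⟩ := pvScanDiv_some n pvKnownPrimes b hscan
      by_cases hm : n ∈ pvKnownPrimes
      · have hnp : n = p := pvMemDiv n hm p hp hdiv
        subst hnp
        simp [isPrimeB, millerRabin, h2, hscan, hm]
      · have hne : n ≠ p := fun h => hm (h ▸ hp)
        have hany : pvKnownPrimes.any (fun q => PySem.Int.mod n q = 0) = true := by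
          simp only [List.any_eq_true]
          exact ⟨p, hp, by simp [hdiv]⟩
        simp [isPrimeB, millerRabin, h2, hscan, hm, hne, hany]
    | none =>
      have hnodvd : ∀ p ∈ pvKnownPrimes, PySem.Int.mod n p ≠ 0 :=
        (pvScanDiv_none n pvKnownPrimes).mp hscan
      have hmem : n ∉ pvKnownPrimes := by
        intro hm
        exact hnodvd n hm
          (by rw [PySem.Int.mod_eq_emod_of_pos (by omega : (0:Int) < n)]; exact Int.emod_self)
      have hany : pvKnownPrimes.any (fun p => PySem.Int.mod n p = 0) = false := by
        simp only [List.any_eq_false, decide_eq_true_eq]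
        exact hnodvd
      have hodd : n % 2 = 1 := by
        have h2d := hnodvd 2 (by decide)
        rw [PySem.Int.mod_eq_emod_of_pos (by omega : (0:Int) < 2)] at h2d
        omega
      have hd0 : 0 < (pvSplit (n - 1) 0).1 := pvSplit_pos (n - 1) 0 (by omega)
      have hs1 : 1 ≤ (pvSplit (n - 1) 0).2 :=
        pvSplit_s_one (n - 1) (by omega)
          (by rw [PySem.Int.mod_eq_emod_of_pos (by omega : (0:Int) < 2)]; omega)
      have hpt : ∀ a : Int,
          strongTestB n (pvSplit (n - 1) 0).1 (pvSplit (n - 1) 0).2 a =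
            !tryComposite a (pvSplit (n - 1) 0).1 n (pvSplit (n - 1) 0).2 :=
        fun a => strong_not_try n _ _ a (by omega) (by omega) hs1
      by_cases h31 : n = 3215031751
      · subst h31
        simp [isPrimeB, millerRabin, hscan, hany, hmem]
      · simp only [isPrimeB, millerRabin, hscan, if_neg h2, if_neg h31]
        simp only [List.contains_eq_mem, hmem, decide_false, Bool.false_eq_true,
          if_false, hany]
        by_cases hb1 : n < 1373653
        · simp [pvKnownPrimes, if_pos hb1, hpt]
        · by_cases hb2 : n < 25326001
          · simp [pvKnownPrimes, if_neg hb1, if_pos hb2, hpt]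
          · by_cases hb3 : n < 118670087467
            · simp [pvKnownPrimes, if_neg hb1, if_neg hb2, if_pos hb3, hpt]
            · simp [pvKnownPrimes, if_neg hb1, if_neg hb2, if_neg hb3, hpt]

-- A's test rejects every even n ≥ 4
theorem millerRabin_even (n : Int) (h4 : 4 ≤ n) (he : n % 2 = 0) : millerRabin n = false := by
  have h1 : ¬ n < 2 := by omega
  have hc : n ∉ pvKnownPrimes := by
    intro hmem
    simp only [pvKnownPrimes, List.mem_cons, List.not_mem_nil, or_false] at hmem
    omega
  have hany : pvKnownPrimes.any (fun p => PySem.Int.mod n p = 0) = true := by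
    simp only [List.any_eq_true]
    refine ⟨2, by simp [pvKnownPrimes], ?_⟩
    rw [PySem.Int.mod_eq_emod_of_pos (by omega : (0:Int) < 2)]
    simpa using he
  simp [millerRabin, h1, hc, hany]

-- ---- the boring-number stream, shared characterisation of both searches ----

-- the list of boring numbers in (num, hi] given the rolling fib state (num, f0, f1)
def boringSeg (num f0 f1 hi : Int) : List Int :=
  if h : num < hi then
    if num + 1 = f1 then boringSeg (num + 1) f1 (f0 + f1) hi
    else if millerRabin (num + 1) then boringSeg (num + 1) f0 f1 hi
    else (num + 1) :: boringSeg (num + 1) f0 f1 hi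
  else []
termination_by (hi - num).toNat

theorem loopA_zero (fuel : Nat) (num f0 f1 : Int) : loopA fuel 0 num f0 f1 = num := by
  cases fuel <;> simp [loopA]

-- A's loop returns the (k-1)-st element of the boring stream
theorem loopA_eq (hi num f0 f1 : Int) : ∀ (k : Int) (fuel : Nat), 1 ≤ k →
    k.toNat ≤ (boringSeg num f0 f1 hi).length → (hi - num).toNat ≤ fuel →
    loopA fuel k num f0 f1 = (boringSeg num f0 f1 hi).getD (k.toNat - 1) 0 := by
  induction num, f0, f1 using boringSeg.induct (hi := hi) with
  | case1 num f0 h ih =>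
    intro k fuel hk hlen hfuel
    rw [boringSeg, dif_pos h, if_pos rfl] at hlen ⊢
    obtain ⟨fuel', rfl⟩ : ∃ f', fuel = f' + 1 := ⟨fuel - 1, by omega⟩
    rw [loopA, if_neg (by omega), if_pos rfl]
    exact ih k fuel' hk hlen (by omega)
  | case2 num f0 f1 h hfib hmr ih =>
    intro k fuel hk hlen hfuel
    rw [boringSeg, dif_pos h, if_neg hfib, if_pos hmr] at hlen ⊢
    obtain ⟨fuel', rfl⟩ : ∃ f', fuel = f' + 1 := ⟨fuel - 1, by omega⟩
    rw [loopA, if_neg (by omega), if_neg hfib, if_pos hmr]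
    exact ih k fuel' hk hlen (by omega)
  | case3 num f0 f1 h hfib hmr ih =>
    intro k fuel hk hlen hfuel
    rw [boringSeg, dif_pos h, if_neg hfib, if_neg hmr] at hlen ⊢
    obtain ⟨fuel', rfl⟩ : ∃ f', fuel = f' + 1 := ⟨fuel - 1, by omega⟩
    rw [loopA, if_neg (by omega), if_neg hfib, if_neg hmr]
    by_cases hk1 : k = 1
    · subst hk1
      have e0 : (1:Int) - 1 = 0 := by norm_num
      rw [e0, loopA_zero]
      simp
    · have h2 : (2:Int) ≤ k := by omega
      rw [ih (k - 1) fuel' (by omega) (by simp at hlen; omega) (by omega)]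
      have e1 : k.toNat - 1 = (k.toNat - 2) + 1 := by omega
      have e2 : (k - 1).toNat - 1 = k.toNat - 2 := by omega
      rw [e1, e2, List.getD_cons_succ]
  | case4 num f0 f1 h =>
    intro k fuel hk hlen hfuel
    rw [boringSeg, dif_neg h] at hlen
    simp at hlen
    omega

-- ---- fibList facts ----

theorem fibList_mem_ge (hi f0 f1 : Int) : ∀ n ∈ fibList hi f0 f1, f1 ≤ n := by
  induction f0, f1 using fibList.induct (hi := hi) with
  | case1 f0 f1 h ih =>
    intro n hn
    rw [fibList, dif_pos h] at hn
    rcases List.mem_cons.mp hn with rfl | hn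
    · omega
    · have := ih n hn
      omega
  | case2 f0 f1 h =>
    intro n hn
    rw [fibList, dif_neg h] at hn
    simp at hn

-- B's filtering pass computes the boring stream
theorem seg_filter (hi num f0 f1 : Int) : 0 < f0 → f0 < f1 → num < f1 →
    boringSeg num f0 f1 hi =
      (PySem.List.pyRange (num + 1) (hi + 1) 1).filter
        (fun n => !((fibList hi f0 f1).contains n) && !isPrimeB n) := by
  induction num, f0, f1 using boringSeg.induct (hi := hi) with
  | case1 num f0 h ih =>
    intro h0 h01 hn1
    rw [boringSeg, dif_pos h, if_pos rfl]
    rw [PySem.List.pyRange_one_cons (by omega), List.filter_cons]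
    have hfl : fibList hi f0 (num + 1) = (num + 1) :: fibList hi (num + 1) (f0 + (num + 1)) := by
      rw [fibList, dif_pos (⟨h0, by omega⟩ : 0 < f0 ∧ num + 1 ≤ hi)]
    have hcont : (fibList hi f0 (num + 1)).contains (num + 1) = true := by
      rw [hfl]; simp
    rw [hcont]
    simp only [Bool.not_true, Bool.false_and]
    rw [ih (by omega) (by omega) (by omega)]
    apply List.filter_congr
    intro x hx
    have hxge : num + 1 + 1 ≤ x := (PySem.List.mem_pyRange_one.mp hx).1
    have hxne : x ≠ num + 1 := by omega
    have hbe : (x == num + 1) = false := by simpa using hxne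
    rw [hfl, List.contains_cons, hbe]
    simp
  | case2 num f0 f1 h hfib hmr ih =>
    intro h0 h01 hn1
    have hlt : num + 1 < f1 := by omega
    rw [boringSeg, dif_pos h, if_neg hfib, if_pos hmr]
    rw [PySem.List.pyRange_one_cons (by omega), List.filter_cons]
    have hpr : isPrimeB (num + 1) = true := by rw [isPrimeB_eq]; exact hmr
    rw [hpr]
    simp only [Bool.not_true, Bool.and_false]
    exact ih h0 h01 hlt
  | case3 num f0 f1 h hfib hmr ih =>
    intro h0 h01 hn1
    have hlt : num + 1 < f1 := by omega
    rw [boringSeg, dif_pos h, if_neg hfib, if_neg hmr]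
    rw [PySem.List.pyRange_one_cons (by omega), List.filter_cons]
    have hcont : (fibList hi f0 f1).contains (num + 1) = false := by
      rw [← Bool.not_eq_true]
      intro hc
      have hmem : num + 1 ∈ fibList hi f0 f1 := by simpa using hc
      have := fibList_mem_ge hi f0 f1 (num + 1) hmem
      omega
    have hpr : isPrimeB (num + 1) = false := by
      rw [isPrimeB_eq]
      exact Bool.of_not_eq_true hmr
    rw [hcont, hpr]
    simp only [Bool.not_false, Bool.and_self, if_true]
    rw [ih h0 h01 hlt]
  | case4 num f0 f1 h =>
    intro _ _ _
    rw [boringSeg, dif_neg h, PySem.List.pyRange_one_eq_nil (by omega), List.filter_nil]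

-- a shorter bound yields a prefix of the stream
theorem seg_prefix (hi num f0 f1 hi' : Int) : hi' ≤ hi →
    boringSeg num f0 f1 hi' <+: boringSeg num f0 f1 hi := by
  induction num, f0, f1 using boringSeg.induct (hi := hi') with
  | case1 num f0 h ih =>
    intro hle
    have hL : boringSeg num f0 (num + 1) hi' = boringSeg (num + 1) (num + 1) (f0 + (num + 1)) hi' := by
      rw [boringSeg, dif_pos h, if_pos rfl]
    have hR : boringSeg num f0 (num + 1) hi = boringSeg (num + 1) (num + 1) (f0 + (num + 1)) hi := by
      rw [boringSeg, dif_pos (by omega : num < hi), if_pos rfl]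
    rw [hL, hR]
    exact ih hle
  | case2 num f0 f1 h hfib hmr ih =>
    intro hle
    have hL : boringSeg num f0 f1 hi' = boringSeg (num + 1) f0 f1 hi' := by
      rw [boringSeg, dif_pos h, if_neg hfib, if_pos hmr]
    have hR : boringSeg num f0 f1 hi = boringSeg (num + 1) f0 f1 hi := by
      rw [boringSeg, dif_pos (by omega : num < hi), if_neg hfib, if_pos hmr]
    rw [hL, hR]
    exact ih hle
  | case3 num f0 f1 h hfib hmr ih =>
    intro hle
    have hL : boringSeg num f0 f1 hi' = (num + 1) :: boringSeg (num + 1) f0 f1 hi' := by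
      rw [boringSeg, dif_pos h, if_neg hfib, if_neg hmr]
    have hR : boringSeg num f0 f1 hi = (num + 1) :: boringSeg (num + 1) f0 f1 hi := by
      rw [boringSeg, dif_pos (by omega : num < hi), if_neg hfib, if_neg hmr]
    rw [hL, hR]
    exact List.cons_prefix_cons.mpr ⟨rfl, ih hle⟩
  | case4 num f0 f1 h =>
    intro _
    have hL : boringSeg num f0 f1 hi' = [] := by rw [boringSeg, dif_neg h]
    rw [hL]
    exact List.nil_prefix

theorem prefix_getD (l1 l2 : List Int) (h : l1 <+: l2) (i : Nat) (hlen : i < l1.length) :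
    l1.getD i 0 = l2.getD i 0 := by
  obtain ⟨t, rfl⟩ := h
  rw [List.getD_eq_getElem?_getD, List.getD_eq_getElem?_getD,
      List.getElem?_append_left hlen]

theorem seg_getD_eq (num f0 f1 hi hi' : Int) (i : Nat)
    (h1 : i < (boringSeg num f0 f1 hi).length) (h2 : i < (boringSeg num f0 f1 hi').length) :
    (boringSeg num f0 f1 hi).getD i 0 = (boringSeg num f0 f1 hi').getD i 0 := by
  rcases le_total hi hi' with hle | hle
  · exact prefix_getD _ _ (seg_prefix hi' num f0 f1 hi hle) i h1
  · exact (prefix_getD _ _ (seg_prefix hi num f0 f1 hi' hle) i h2).symm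

-- ---- density: at least one boring number among any four consecutive candidates ----

def pvInv (num f0 f1 : Int) : Prop := 3 ≤ num ∧ 3 ≤ f0 ∧ f0 + 2 ≤ f1 ∧ num < f1

-- the first even candidate > num that is not the pending Fibonacci number: a boring
-- number at distance ≤ 4
def pvTarget (num f1 : Int) : Int :=
  let e := if (num + 1) % 2 = 0 then num + 1 else num + 2
  if e = f1 then e + 2 else e

theorem pvTarget_bounds (num f0 f1 : Int) (h : pvInv num f0 f1) :
    num + 1 ≤ pvTarget num f1 ∧ pvTarget num f1 ≤ num + 4 ∧
    pvTarget num f1 % 2 = 0 ∧ 4 ≤ pvTarget num f1 ∧ pvTarget num f1 ≠ f1 := by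
  unfold pvInv at h
  simp only [pvTarget]
  split_ifs <;> omega

theorem pvTarget_fib (num f0 f1 : Int) (h : pvInv num f0 f1) (he : num + 1 = f1) :
    pvTarget (num + 1) (f0 + f1) = pvTarget num f1 := by
  unfold pvInv at h
  simp only [pvTarget]
  split_ifs <;> omega

theorem pvTarget_odd (num f1 : Int) (ho : (num + 1) % 2 = 1) :
    pvTarget (num + 1) f1 = pvTarget num f1 := by
  simp only [pvTarget]
  split_ifs <;> omega

theorem segStep (t : Nat) :
    ∀ num f0 f1 hi : Int, pvInv num f0 f1 → pvTarget num f1 ≤ num + t → num + t ≤ hi →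
    ∃ (u : Int) (f0' f1' : Int), 1 ≤ u ∧ u ≤ t ∧ pvInv (num + u) f0' f1' ∧
      boringSeg num f0 f1 hi = (num + u) :: boringSeg (num + u) f0' f1' hi := by
  induction t with
  | zero =>
    intro num f0 f1 hi hI hT _
    exact absurd hT (by have := (pvTarget_bounds num f0 f1 hI).1; omega)
  | succ t ih =>
    intro num f0 f1 hi hI hT hhi
    have hb := pvTarget_bounds num f0 f1 hI
    have hI4 := hI
    unfold pvInv at hI4
    have hlt : num < hi := by omega
    by_cases hfib : num + 1 = f1
    · have hI' : pvInv (num + 1) f1 (f0 + f1) := by unfold pvInv; omega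
      have hT' : pvTarget (num + 1) (f0 + f1) ≤ (num + 1) + t := by
        rw [pvTarget_fib num f0 f1 hI hfib]; omega
      obtain ⟨u, a', b', hu1, hu2, hI'', hseg⟩ := ih (num + 1) f1 (f0 + f1) hi hI' hT' (by omega)
      refine ⟨u + 1, a', b', by omega, by omega, by
        have e : num + (u + 1) = (num + 1) + u := by omega
        rw [e]; exact hI'', ?_⟩
      rw [boringSeg, dif_pos hlt, if_pos hfib, hseg]
      have e : num + 1 + u = num + (u + 1) := by omega
      rw [e]
    · by_cases hmr : millerRabin (num + 1) = true
      · have hodd : (num + 1) % 2 = 1 := by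
          rcases Int.emod_two_eq_zero_or_one (num + 1) with h2 | h2
          · exact absurd hmr (by rw [millerRabin_even (num + 1) (by omega) h2]; simp)
          · exact h2
        have hI' : pvInv (num + 1) f0 f1 := by unfold pvInv; omega
        have hT' : pvTarget (num + 1) f1 ≤ (num + 1) + t := by
          rw [pvTarget_odd num f1 hodd]; omega
        obtain ⟨u, a', b', hu1, hu2, hI'', hseg⟩ := ih (num + 1) f0 f1 hi hI' hT' (by omega)
        refine ⟨u + 1, a', b', by omega, by omega, by
          have e : num + (u + 1) = (num + 1) + u := by omega
          rw [e]; exact hI'', ?_⟩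
        rw [boringSeg, dif_pos hlt, if_neg hfib, if_pos hmr, hseg]
        have e : num + 1 + u = num + (u + 1) := by omega
        rw [e]
      · refine ⟨1, f0, f1, by omega, by omega, by unfold pvInv; omega, ?_⟩
        rw [boringSeg, dif_pos hlt, if_neg hfib, if_neg hmr]

theorem seg_ge (m : Nat) : ∀ num f0 f1 hi : Int, pvInv num f0 f1 →
    num + 4 * (m : Int) ≤ hi → m ≤ (boringSeg num f0 f1 hi).length := by
  induction m with
  | zero => intro num f0 f1 hi _ _; omega
  | succ m ih =>
    intro num f0 f1 hi hI hhi
    have hT : pvTarget num f1 ≤ num + 4 := (pvTarget_bounds num f0 f1 hI).2.1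
    have hhi4 : num + 4 ≤ hi := by push_cast at hhi; omega
    obtain ⟨u, a', b', hu1, hu2, hI', hseg⟩ :=
      segStep 4 num f0 f1 hi hI (by exact_mod_cast hT) (by exact_mod_cast hhi4)
    rw [hseg, List.length_cons]
    have := ih (num + u) a' b' hi hI' (by push_cast at hhi ⊢; omega)
    omega

theorem pvInv335 : pvInv 3 3 5 := by unfold pvInv; norm_num

theorem boringList_eq (hi : Int) : boringList hi = 3 :: boringSeg 3 3 5 hi := by
  rw [boringList, seg_filter hi 3 3 5 (by norm_num) (by norm_num) (by norm_num)]
  norm_num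

theorem getD_cons_of_pos (a : Int) (l : List Int) (n : Nat) (h : 1 ≤ n) :
    (a :: l).getD n 0 = l.getD (n - 1) 0 := by
  obtain ⟨m, rfl⟩ : ∃ m, n = m + 1 := ⟨n - 1, by omega⟩
  simp

-- A's value is the k-th entry of the batch list at the bound 3 + 4k
theorem A_val (k : Int) (hk : 0 ≤ k) :
    kthBoring k = (boringList (3 + 4 * (k.toNat : Int))).getD k.toNat 0 := by
  rw [boringList_eq]
  by_cases hk0 : k = 0
  · subst hk0
    simp [kthBoring, loopA_zero]
  · have hk1 : 1 ≤ k := by omega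
    rw [getD_cons_of_pos _ _ _ (by omega)]
    have hlen : k.toNat ≤ (boringSeg 3 3 5 (3 + 4 * (k.toNat : Int))).length :=
      seg_ge k.toNat 3 3 5 _ pvInv335 (by omega)
    exact loopA_eq (3 + 4 * (k.toNat : Int)) 3 3 5 k (4 * k.toNat + 1) hk1 hlen (by omega)

theorem cond_val (k hi : Int) (hk : 0 ≤ k)
    (hc : k.toNat < (boringList hi).length) :
    (boringList hi).getD k.toNat 0 = (boringList (3 + 4 * (k.toNat : Int))).getD k.toNat 0 := by
  rw [boringList_eq] at hc
  rw [boringList_eq, boringList_eq]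
  by_cases hk0 : k = 0
  · subst hk0; simp
  · have hk1 : 1 ≤ k := by omega
    rw [getD_cons_of_pos _ _ _ (by omega), getD_cons_of_pos _ _ _ (by omega)]
    apply seg_getD_eq
    · rw [List.length_cons] at hc; omega
    · have := seg_ge k.toNat 3 3 5 (3 + 4 * (k.toNat : Int)) pvInv335 (by omega)
      omega

theorem searchB_eq (k : Int) (hk : 0 ≤ k) : ∀ (fuel : Nat), ∀ hi : Int, 8 ≤ hi →
    (4 * (k.toNat : Int) + 4) ≤ hi * 2 ^ fuel →
    searchB (fuel + 1) k hi = (boringList (3 + 4 * (k.toNat : Int))).getD k.toNat 0 := by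
  intro fuel
  induction fuel with
  | zero =>
    intro hi h8 hbd
    simp only [pow_zero, mul_one] at hbd
    have hlen : k.toNat < (boringList hi).length := by
      rw [boringList_eq, List.length_cons]
      have := seg_ge k.toNat 3 3 5 hi pvInv335 (by omega)
      omega
    simp only [searchB]
    rw [if_pos (by omega : k < ((boringList hi).length : Int))]
    exact cond_val k hi hk hlen
  | succ fuel ih =>
    intro hi h8 hbd
    simp only [searchB]
    by_cases hc : k < ((boringList hi).length : Int)
    · rw [if_pos hc]
      exact cond_val k hi hk (by omega)
    · rw [if_neg hc]
      apply ih (2 * hi) (by omega)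
      have e : hi * 2 ^ (fuel + 1) = 2 * hi * 2 ^ fuel := by ring
      omega

-- ===== VERDICT (by name: the statement is the Claim_ definition above) =====
theorem kthBoring_spec : Claim_equal_kthBoring := by
  intro k _ hk
  unfold Spec_kthBoring kthBoring_alt
  have hbd : (4 * (k.toNat : Int) + 4) ≤ 8 * 2 ^ k.toNat := by
    have hm : k.toNat + 1 ≤ 2 ^ k.toNat := Nat.lt_two_pow_self
    have h1 : 4 * k.toNat + 4 ≤ 8 * 2 ^ k.toNat := by
      calc 4 * k.toNat + 4 = 4 * (k.toNat + 1) := by ring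
        _ ≤ 4 * 2 ^ k.toNat := Nat.mul_le_mul_left 4 hm
        _ ≤ 8 * 2 ^ k.toNat := Nat.mul_le_mul_right _ (by norm_num)
    exact_mod_cast h1
  rw [searchB_eq k hk k.toNat 8 (by norm_num) hbd, A_val k hk]
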